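-- pv_equiv track=rewrite | github.com/meiravlevy/MyProjects | Intro to Computer Science Python/ex4/hangman.py | is_word_valid
-- ===== SOURCE A (Python) =====
-- def is_lett_in_wrong_guess_list(letter, wrong_guess_list):
--     """This function checks if lwtter is in the wrong guess list"""
--     if letter in wrong_guess_list:
--         return True
--     return False
--
-- def is_word_valid(pattern, word, wrong_guess_list):
--     """This function checks if the pattern has the same letters in the same
--     indexes as the word does."""
--     if len(pattern) != len(word):
--         return False
--     for index, pattern_letter in enumerate(pattern):
--         if pattern_letter != "_":
--            if pattern_letter != word[index]:
--                return False
--            if pattern.count(pattern_letter) != word.count(pattern_letter):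
--                return False
--         if is_lett_in_wrong_guess_list(word[index], wrong_guess_list):
--             return False
--     return True
-- ===== SOURCE B (Python) =====
-- def is_word_valid(pattern, word, wrong_guess_list):
--     if len(pattern) != len(word):
--         return False
--     revealed = set()
--     for p, c in zip(pattern, word):
--         if p != '_':
--             if p != c:
--                 return False
--             revealed.add(p)
--     wrong = set(wrong_guess_list)
--     for p, c in zip(pattern, word):
--         if c in wrong:
--             return False
--         if p == '_' and c in revealed:
--             return False
--     return True
-- ===== Notes on version B (the rewrite author's own statement) =====
-- stated objective: faster
-- what changed: A re-verifies per-index letter-count equality with str.count inside the loop (quadratic); B makes two linear passes, first building the set of revealed letters while checking revealed positions, then rejecting any word letter in the wrong-guess set or any revealed letter sitting in a hidden '_' slot.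
import Mathlib
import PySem

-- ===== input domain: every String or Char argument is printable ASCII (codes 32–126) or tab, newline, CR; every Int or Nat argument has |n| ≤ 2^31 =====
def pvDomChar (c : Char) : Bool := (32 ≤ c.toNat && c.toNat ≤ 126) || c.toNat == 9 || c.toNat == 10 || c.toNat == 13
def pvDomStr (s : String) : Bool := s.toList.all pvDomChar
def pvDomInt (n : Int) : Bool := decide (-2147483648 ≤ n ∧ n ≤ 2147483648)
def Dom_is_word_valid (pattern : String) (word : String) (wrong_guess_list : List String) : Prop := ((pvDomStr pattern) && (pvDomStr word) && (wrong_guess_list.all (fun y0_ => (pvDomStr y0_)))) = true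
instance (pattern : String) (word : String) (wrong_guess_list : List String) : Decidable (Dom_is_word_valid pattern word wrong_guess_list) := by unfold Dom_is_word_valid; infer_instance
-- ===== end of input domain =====

-- B replaces A's per-index str.count equality test with two linear passes maintaining a
-- set of revealed letters (a hidden slot must not hold a revealed letter); objective:
-- alternative/simpler predicate shape, same return value on every input.

-- ===== PORT A =====
def is_lett_in_wrong_guess_list (letter : String) (wrong_guess_list : List String) : Bool :=
  if letter ∈ wrong_guess_list then true else false

-- A's for-loop over enumerate(pattern) with early returns.  word[index] is always in
-- range when the loop runs (lengths already equal), ported as pyGetD with a dummy default.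
-- str.count of a single-character needle is exactly List.count on the character lists.
def isWordValidLoopA (pattern word : List Char) (wrong_guess_list : List String) :
    List (Int × Char) → Bool
  | [] => true
  | (index, pattern_letter) :: rest =>
    if pattern_letter ≠ '_' then
      if pattern_letter ≠ PySem.List.pyGetD word index ' ' then false
      else if pattern.count pattern_letter ≠ word.count pattern_letter then false
      else if is_lett_in_wrong_guess_list (String.ofList [PySem.List.pyGetD word index ' ']) wrong_guess_list then false
      else isWordValidLoopA pattern word wrong_guess_list rest
    else
      if is_lett_in_wrong_guess_list (String.ofList [PySem.List.pyGetD word index ' ']) wrong_guess_list then false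
      else isWordValidLoopA pattern word wrong_guess_list rest

def is_word_valid (pattern : String) (word : String) (wrong_guess_list : List String) : Bool :=
  let p := pattern.toList
  let w := word.toList
  if p.length ≠ w.length then false
  else isWordValidLoopA p w wrong_guess_list (PySem.List.enumerate p)

-- ===== PORT B =====
-- first pass of Source B: none = early `return False`, otherwise the revealed-letter set
def altRevealedPass (pairs : List (Char × Char)) (revealed : PySem.Set Char) :
    Option (PySem.Set Char) :=
  match pairs with
  | [] => some revealed
  | (p, c) :: rest =>
    if p ≠ '_' then
      if p ≠ c then none
      else altRevealedPass rest (PySem.Set.add revealed p)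
    else altRevealedPass rest revealed

-- second pass of Source B
def altCheckPass (wrong : PySem.Set String) (revealed : PySem.Set Char) :
    List (Char × Char) → Bool
  | [] => true
  | (p, c) :: rest =>
    if PySem.Set.contains wrong (String.ofList [c]) then false
    else if decide (p = '_') && PySem.Set.contains revealed c then false
    else altCheckPass wrong revealed rest

def is_word_valid_alt (pattern : String) (word : String) (wrong_guess_list : List String) : Bool :=
  let pl := pattern.toList
  let wl := word.toList
  if pl.length ≠ wl.length then false
  else
    match altRevealedPass (pl.zip wl) PySem.Set.empty with
    | none => false
    | some revealed => altCheckPass (PySem.Set.ofList wrong_guess_list) revealed (pl.zip wl)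

-- ===== PRECONDITION & SPEC =====
def Spec_is_word_valid (pattern : String) (word : String) (wrong_guess_list : List String) (out : Bool) : Prop := out = is_word_valid_alt pattern word wrong_guess_list
instance (pattern : String) (word : String) (wrong_guess_list : List String) (out : Bool) : Decidable (Spec_is_word_valid pattern word wrong_guess_list out) := by unfold Spec_is_word_valid; infer_instance

-- ===== CLAIM (what is proved, stated in full; the proofs are below) =====
def Claim_equal_is_word_valid : Prop := ∀ (pattern : String) (word : String) (wrong_guess_list : List String), Dom_is_word_valid pattern word wrong_guess_list → Spec_is_word_valid pattern word wrong_guess_list (is_word_valid pattern word wrong_guess_list)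

-- ===== LEMMAS AND PROOFS =====

theorem bool_eq_of_iff {a b : Bool} (h : a = true ↔ b = true) : a = b := by
  cases a <;> cases b <;> first | rfl | (exfalso; simp at h)

theorem getD_eq_get {α : Type} (l : List α) (d : α) (k : Nat) (hk : k < l.length) :
    l.getD k d = l[k] := by
  simp [List.getD_eq_getElem?_getD, List.getElem?_eq_getElem hk]

theorem lett_iff (s : String) (wgl : List String) :
    is_lett_in_wrong_guess_list s wgl = true ↔ s ∈ wgl := by
  unfold is_lett_in_wrong_guess_list
  by_cases h : s ∈ wgl <;> simp [h]

theorem set_contains_iff {α : Type} [BEq α] [LawfulBEq α] (s : PySem.Set α) (x : α) :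
    PySem.Set.contains s x = true ↔ x ∈ s := by
  simp [PySem.Set.contains]

theorem zip_getElem_mem {α β : Type} {p : List α} {w : List β}
    (h : p.length = w.length) {k : Nat} (hk : k < p.length) :
    (p[k], w[k]'(h ▸ hk)) ∈ p.zip w := by
  have hk' : k < (p.zip w).length := by rw [List.length_zip]; omega
  have h2 : (p.zip w)[k] = (p[k], w[k]'(h ▸ hk)) := List.getElem_zip
  exact h2 ▸ List.getElem_mem hk'

theorem forall_zip_iff {α β : Type} {p : List α} {w : List β}
    (h : p.length = w.length) (P : α × β → Prop) :
    (∀ x ∈ p.zip w, P x) ↔ ∀ (k : Nat) (hk : k < p.length), P (p[k], w[k]'(h ▸ hk)) := by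
  constructor
  · intro H k hk
    exact H _ (zip_getElem_mem h hk)
  · intro H x hx
    rcases List.mem_iff_getElem.1 hx with ⟨k, hk, rfl⟩
    have hkp : k < p.length := by rw [List.length_zip] at hk; omega
    have h2 : (p.zip w)[k] = (p[k], w[k]'(h ▸ hkp)) := List.getElem_zip
    rw [h2]
    exact H k hkp

-- characterization of A's loop
theorem loopA_iff (p w : List Char) (wgl : List String) (l : List (Int × Char)) :
    isWordValidLoopA p w wgl l = true ↔
      ∀ x ∈ l, (x.2 ≠ '_' → x.2 = PySem.List.pyGetD w x.1 ' ' ∧ p.count x.2 = w.count x.2) ∧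
        String.ofList [PySem.List.pyGetD w x.1 ' '] ∉ wgl := by
  induction l with
  | nil => simp [isWordValidLoopA]
  | cons hd tl ih =>
    obtain ⟨i, pc⟩ := hd
    rw [List.forall_mem_cons, ← ih]
    simp only [isWordValidLoopA]
    by_cases h1 : pc = '_'
    · rw [if_neg (fun hc => hc h1)]
      by_cases h4 : String.ofList [PySem.List.pyGetD w i ' '] ∈ wgl
      · rw [if_pos ((lett_iff _ _).2 h4)]
        simp only [Bool.false_eq_true, false_iff]
        rintro ⟨⟨-, hm⟩, -⟩
        exact hm h4
      · rw [if_neg (fun hc => h4 ((lett_iff _ _).1 hc))]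
        constructor
        · intro hrec
          exact ⟨⟨fun hc => absurd h1 hc, h4⟩, hrec⟩
        · exact fun hh => hh.2
    · rw [if_pos h1]
      by_cases h2 : pc = PySem.List.pyGetD w i ' '
      · rw [if_neg (fun hc => hc h2)]
        by_cases h3 : p.count pc = w.count pc
        · rw [if_neg (fun hc => hc h3)]
          by_cases h4 : String.ofList [PySem.List.pyGetD w i ' '] ∈ wgl
          · rw [if_pos ((lett_iff _ _).2 h4)]
            simp only [Bool.false_eq_true, false_iff]
            rintro ⟨⟨-, hm⟩, -⟩
            exact hm h4
          · rw [if_neg (fun hc => h4 ((lett_iff _ _).1 hc))]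
            constructor
            · intro hrec
              exact ⟨⟨fun _ => ⟨h2, h3⟩, h4⟩, hrec⟩
            · exact fun hh => hh.2
        · rw [if_pos h3]
          simp only [Bool.false_eq_true, false_iff]
          rintro ⟨⟨hC, -⟩, -⟩
          exact h3 (hC h1).2
      · rw [if_pos h2]
        simp only [Bool.false_eq_true, false_iff]
        rintro ⟨⟨hC, -⟩, -⟩
        exact h2 (hC h1).1

-- B's first pass succeeds iff every non-'_' pattern letter matches the word letter
theorem pass1_isSome (pairs : List (Char × Char)) (acc : PySem.Set Char) :
    (altRevealedPass pairs acc).isSome = true ↔ ∀ x ∈ pairs, x.1 ≠ '_' → x.1 = x.2 := by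
  induction pairs generalizing acc with
  | nil => simp [altRevealedPass]
  | cons hd tl ih =>
    obtain ⟨a, b⟩ := hd
    rw [List.forall_mem_cons]
    simp only [altRevealedPass]
    by_cases h1 : a = '_'
    · rw [if_neg (fun hc => hc h1)]
      rw [ih acc]
      constructor
      · intro hh
        exact ⟨fun hc => absurd h1 hc, hh⟩
      · exact fun hh => hh.2
    · rw [if_pos h1]
      by_cases h2 : a = b
      · rw [if_neg (fun hc => hc h2)]
        rw [ih (PySem.Set.add acc a)]
        constructor
        · intro hh
          exact ⟨fun _ => h2, hh⟩
        · exact fun hh => hh.2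
      · rw [if_pos h2]
        simp only [Option.isSome_none, Bool.false_eq_true, false_iff]
        rintro ⟨hC, -⟩
        exact h2 (hC h1)

-- the set produced by B's first pass: accumulator plus all revealed letters
theorem pass1_mem (pairs : List (Char × Char)) :
    ∀ (acc s : PySem.Set Char), altRevealedPass pairs acc = some s → ∀ y : Char,
      (y ∈ s ↔ y ∈ acc ∨ ∃ x ∈ pairs, x.1 = y ∧ x.1 ≠ '_') := by
  induction pairs with
  | nil =>
    intro acc s h y
    simp only [altRevealedPass, Option.some.injEq] at h
    subst h
    simp
  | cons hd tl ih =>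
    intro acc s h y
    obtain ⟨a, b⟩ := hd
    simp only [altRevealedPass] at h
    by_cases h1 : a = '_'
    · rw [if_neg (fun hc => hc h1)] at h
      rw [ih _ _ h y]
      simp only [List.mem_cons]
      constructor
      · rintro (hy | ⟨x, hx1, hx2⟩)
        · exact Or.inl hy
        · exact Or.inr ⟨x, Or.inr hx1, hx2⟩
      · rintro (hy | ⟨x, hx1 | hx1, hx2⟩)
        · exact Or.inl hy
        · subst hx1
          exact absurd h1 hx2.2
        · exact Or.inr ⟨x, hx1, hx2⟩
    · rw [if_pos h1] at h
      by_cases h2 : a = b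
      · rw [if_neg (fun hc => hc h2)] at h
        rw [ih _ _ h y, PySem.Set.mem_add]
        simp only [List.mem_cons]
        constructor
        · rintro ((hy | hya) | ⟨x, hx1, hx2⟩)
          · exact Or.inl hy
          · exact Or.inr ⟨(a, b), Or.inl rfl, hya.symm, h1⟩
          · exact Or.inr ⟨x, Or.inr hx1, hx2⟩
        · rintro (hy | ⟨x, hx1 | hx1, hx2⟩)
          · exact Or.inl (Or.inl hy)
          · subst hx1
            exact Or.inl (Or.inr hx2.1.symm)
          · exact Or.inr ⟨x, hx1, hx2⟩
      · rw [if_pos h2] at h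
        exact absurd h (by simp)

-- characterization of B's second pass
theorem pass2_iff (wrong : PySem.Set String) (revealed : PySem.Set Char)
    (pairs : List (Char × Char)) :
    altCheckPass wrong revealed pairs = true ↔
      ∀ x ∈ pairs, String.ofList [x.2] ∉ wrong ∧ ¬(x.1 = '_' ∧ x.2 ∈ revealed) := by
  induction pairs with
  | nil => simp [altCheckPass]
  | cons hd tl ih =>
    obtain ⟨a, b⟩ := hd
    rw [List.forall_mem_cons, ← ih]
    simp only [altCheckPass]
    by_cases h1 : String.ofList [b] ∈ wrong
    · rw [if_pos ((set_contains_iff _ _).2 h1)]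
      simp only [Bool.false_eq_true, false_iff]
      rintro ⟨⟨hm, -⟩, -⟩
      exact hm h1
    · rw [if_neg (fun hc => h1 ((set_contains_iff _ _).1 hc))]
      by_cases h2 : a = '_' ∧ b ∈ revealed
      · have hcond : (decide (a = '_') && PySem.Set.contains revealed b) = true := by
          rw [Bool.and_eq_true, decide_eq_true_eq]
          exact ⟨h2.1, (set_contains_iff _ _).2 h2.2⟩
        rw [if_pos hcond]
        simp only [Bool.false_eq_true, false_iff]
        rintro ⟨⟨-, hm⟩, -⟩
        exact hm h2
      · have hcond : ¬((decide (a = '_') && PySem.Set.contains revealed b) = true) := by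
          rw [Bool.and_eq_true, decide_eq_true_eq]
          rintro ⟨ha, hb⟩
          exact h2 ⟨ha, (set_contains_iff _ _).1 hb⟩
        rw [if_neg hcond]
        constructor
        · intro hrec
          exact ⟨⟨h1, h2⟩, hrec⟩
        · exact fun hh => hh.2

-- count bookkeeping: if every c in p sits opposite a c in w, then w's extra c's are
-- exactly those sitting opposite a non-c in p
theorem count_split {p w : List Char} (h : p.length = w.length) (c : Char)
    (hc : ∀ x ∈ p.zip w, x.1 = c → x.2 = c) :
    w.count c = p.count c + (p.zip w).countP (fun x => decide (x.2 = c ∧ x.1 ≠ c)) := by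
  induction p generalizing w with
  | nil =>
    cases w with
    | nil => simp
    | cons b w' => simp at h
  | cons a p' ih =>
    cases w with
    | nil => simp at h
    | cons b w' =>
      have h' : p'.length = w'.length := by simpa using h
      have hc' : ∀ x ∈ p'.zip w', x.1 = c → x.2 = c := by
        intro x hx
        exact hc x (by simp [hx])
      have hhd : a = c → b = c := fun ha => hc (a, b) (by simp) ha
      have hsum := ih h' hc'
      by_cases ha : a = c
      · have hb : b = c := hhd ha
        simp [List.count_cons, List.countP_cons, ha, hb, hsum] <;> omega
      · by_cases hb : b = c
        · simp [List.count_cons, List.countP_cons, ha, hb, hsum] <;> omega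
        · simp [List.count_cons, List.countP_cons, ha, hb, hsum] <;> omega

-- A's whole loop, restated over indices (lengths already equal)
theorem A_iff (p w : List Char) (wgl : List String) (h : p.length = w.length) :
    isWordValidLoopA p w wgl (PySem.List.enumerate p) = true ↔
      ∀ (k : Nat) (hk : k < p.length),
        (p[k] ≠ '_' → p[k] = w[k]'(h ▸ hk) ∧ p.count p[k] = w.count p[k]) ∧
        String.ofList [w[k]'(h ▸ hk)] ∉ wgl := by
  rw [loopA_iff]
  have hg : ∀ (k : Nat) (hk : k < p.length),
      PySem.List.pyGetD w ((0 : Int) + (k : Int)) ' ' = w[k]'(h ▸ hk) := by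
    intro k hk
    have h0 : ((0 : Int) + (k : Int)) = ((k : Nat) : Int) := by omega
    rw [h0, PySem.List.pyGetD_natCast]
    exact getD_eq_get w ' ' k (h ▸ hk)
  constructor
  · intro H k hk
    have hm : ((0 : Int) + (k : Int), p[k]) ∈ PySem.List.enumerate p := by
      rw [PySem.List.mem_enumerate_iff]
      exact ⟨k, hk, rfl⟩
    have hx := H _ hm
    dsimp only at hx
    rw [hg k hk] at hx
    exact hx
  · intro H x hx
    rw [PySem.List.mem_enumerate_iff] at hx
    obtain ⟨k, hk, rfl⟩ := hx
    dsimp only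
    rw [hg k hk]
    exact H k hk

theorem main_equiv (pattern word : String) (wgl : List String) :
    is_word_valid pattern word wgl = is_word_valid_alt pattern word wgl := by
  simp only [is_word_valid, is_word_valid_alt]
  by_cases hlen : pattern.toList.length = word.toList.length
  case neg => rw [if_pos hlen, if_pos hlen]
  rw [if_neg (fun hc => hc hlen), if_neg (fun hc => hc hlen)]
  rcases hs : altRevealedPass (pattern.toList.zip word.toList) PySem.Set.empty with _ | s
  · -- pass 1 failed: some revealed position mismatches, so A fails too
    simp only [hs]
    cases hA : isWordValidLoopA pattern.toList word.toList wgl (PySem.List.enumerate pattern.toList) with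
    | false => rfl
    | true =>
      exfalso
      have hAch := (A_iff _ _ wgl hlen).1 hA
      have hnm : ¬ ∀ x ∈ pattern.toList.zip word.toList, x.1 ≠ '_' → x.1 = x.2 := by
        intro hmatch
        have h1 := (pass1_isSome _ PySem.Set.empty).2 hmatch
        rw [hs] at h1
        simp at h1
      rw [forall_zip_iff hlen] at hnm
      apply hnm
      intro k hk hne
      exact ((hAch k hk).1 hne).1
  · -- pass 1 succeeded with revealed set s
    simp only [hs]
    have hmatch : ∀ x ∈ pattern.toList.zip word.toList, x.1 ≠ '_' → x.1 = x.2 := by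
      apply (pass1_isSome _ PySem.Set.empty).1
      rw [hs]
      rfl
    have hmatch' := (forall_zip_iff hlen _).1 hmatch
    have hmem := pass1_mem (pattern.toList.zip word.toList) PySem.Set.empty s hs
    have hmem' : ∀ y : Char, y ∈ s ↔
        ∃ (j : Nat) (hj : j < pattern.toList.length),
          pattern.toList[j] = y ∧ pattern.toList[j] ≠ '_' := by
      intro y
      rw [hmem y]
      constructor
      · rintro (hy | ⟨x, hx, hx1, hx2⟩)
        · exact absurd hy (by simp [PySem.Set.empty])
        · rcases List.mem_iff_getElem.1 hx with ⟨j, hj, rfl⟩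
          have hjp : j < pattern.toList.length := by rw [List.length_zip] at hj; omega
          have hz : (pattern.toList.zip word.toList)[j]
              = (pattern.toList[j], word.toList[j]'(hlen ▸ hjp)) := List.getElem_zip
          rw [hz] at hx1 hx2
          exact ⟨j, hjp, hx1, hx2⟩
      · rintro ⟨j, hj, h1, h2⟩
        exact Or.inr ⟨(pattern.toList[j], word.toList[j]'(hlen ▸ hj)),
          zip_getElem_mem hlen hj, h1, h2⟩
    apply bool_eq_of_iff
    rw [A_iff _ _ wgl hlen, pass2_iff, forall_zip_iff hlen]
    simp only [PySem.Set.mem_ofList]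
    constructor
    · -- A true → B's second pass true
      intro H k hk
      refine ⟨(H k hk).2, ?_⟩
      rintro ⟨hund, hrev⟩
      rw [hmem'] at hrev
      obtain ⟨j, hj, hpj, hpj'⟩ := hrev
      have hcnt : pattern.toList.count pattern.toList[j]
          = word.toList.count pattern.toList[j] := ((H j hj).1 hpj').2
      have hsplit := count_split hlen pattern.toList[j] (by
        intro x hx h1
        rw [← h1]
        exact (hmatch x hx (fun he => hpj' (h1.symm.trans he))).symm)
      rw [← hcnt] at hsplit
      have hzero : (pattern.toList.zip word.toList).countP
          (fun x => decide (x.2 = pattern.toList[j] ∧ x.1 ≠ pattern.toList[j])) = 0 := by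
        omega
      rw [List.countP_eq_zero] at hzero
      have hx := hzero _ (zip_getElem_mem hlen hk)
      simp only [decide_eq_true_eq] at hx
      exact hx ⟨hpj.symm, fun hh => hpj' (hh.symm.trans hund)⟩
    · -- B's second pass true → A true
      intro H k hk
      refine ⟨?_, (H k hk).1⟩
      intro hne
      have heq : pattern.toList[k] = word.toList[k]'(hlen ▸ hk) := hmatch' k hk hne
      refine ⟨heq, ?_⟩
      have hcc : ∀ x ∈ pattern.toList.zip word.toList,
          x.1 = pattern.toList[k] → x.2 = pattern.toList[k] := by
        intro x hx h1
        rw [← h1]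
        exact (hmatch x hx (fun he => hne (h1.symm.trans he))).symm
      have hsplit := count_split hlen pattern.toList[k] hcc
      have hzero : (pattern.toList.zip word.toList).countP
          (fun x => decide (x.2 = pattern.toList[k] ∧ x.1 ≠ pattern.toList[k])) = 0 := by
        rw [List.countP_eq_zero]
        intro x hx
        simp only [decide_eq_true_eq]
        rintro ⟨h2, h1⟩
        rcases List.mem_iff_getElem.1 hx with ⟨j, hj, rfl⟩
        have hjp : j < pattern.toList.length := by rw [List.length_zip] at hj; omega
        have hz : (pattern.toList.zip word.toList)[j]
            = (pattern.toList[j], word.toList[j]'(hlen ▸ hjp)) := List.getElem_zip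
        rw [hz] at h1 h2
        by_cases hpj : pattern.toList[j] = '_'
        · apply (H j hjp).2
          refine ⟨hpj, ?_⟩
          rw [hmem']
          exact ⟨k, hk, h2.symm, hne⟩
        · exact h1 ((hmatch _ (zip_getElem_mem hlen hjp) hpj).trans h2)
      omega

-- ===== VERDICT (by name: the statement is the Claim_ definition above) =====
theorem is_word_valid_spec : Claim_equal_is_word_valid := by
  intro pattern word wgl _
  unfold Spec_is_word_valid
  exact main_equiv pattern word wgl
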